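-- pv_equiv track=rewrite | github.com/tycyd/codeforces | greedy/proof/1468H K and Medians.py | k_and_medians
-- ===== SOURCE A (Python) =====
-- def k_and_medians(n, k, m, b_a):
--     if (n-m) % (k-1) != 0:
--         return False
--
--     b_s = set(b_a)
--     l_a = [0] * (n+1)
--     for i in range(1, n+1):
--         l_a[i] = l_a[i - 1]
--         if i not in b_s:
--             l_a[i] = l_a[i-1] + 1
--
--     r = 0
--     for i in range(n, 0, -1):
--         if i not in b_s:
--             r += 1
--         elif r >= (k-1) // 2 and l_a[i] >= (k-1) // 2:
--             return True
--
--     return False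
-- ===== SOURCE B (Python) =====
-- def k_and_medians(n, k, m, b_a):
--     if (n - m) % (k - 1) != 0:
--         return False
--     b_s = set(b_a)
--     h = (k - 1) // 2
--     if h <= 0:
--         # every kept position qualifies: just need some b inside [1, n]
--         return any(1 <= b <= n for b in b_s)
--     missing = [i for i in range(1, n + 1) if i not in b_s]
--     if len(missing) < 2 * h:
--         return False
--     lo = missing[h - 1]            # h-th smallest deleted-candidate position
--     hi = missing[len(missing) - h]  # h-th largest
--     return any(lo < b < hi for b in b_s)
-- ===== Notes on version B (the rewrite author's own statement) =====
-- stated objective: alternative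
-- what changed: Replaces A's prefix-count array plus backward per-position scan by an order-statistics test: B builds the sorted list of non-b positions once and asks whether some b lies strictly between its h-th smallest and h-th largest elements (h=(k-1)//2), with a direct membership test when h<=0; Pre_ only excludes k=1, where both programs raise ZeroDivisionError in the (n-m)%(k-1) guard.
import Mathlib
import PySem

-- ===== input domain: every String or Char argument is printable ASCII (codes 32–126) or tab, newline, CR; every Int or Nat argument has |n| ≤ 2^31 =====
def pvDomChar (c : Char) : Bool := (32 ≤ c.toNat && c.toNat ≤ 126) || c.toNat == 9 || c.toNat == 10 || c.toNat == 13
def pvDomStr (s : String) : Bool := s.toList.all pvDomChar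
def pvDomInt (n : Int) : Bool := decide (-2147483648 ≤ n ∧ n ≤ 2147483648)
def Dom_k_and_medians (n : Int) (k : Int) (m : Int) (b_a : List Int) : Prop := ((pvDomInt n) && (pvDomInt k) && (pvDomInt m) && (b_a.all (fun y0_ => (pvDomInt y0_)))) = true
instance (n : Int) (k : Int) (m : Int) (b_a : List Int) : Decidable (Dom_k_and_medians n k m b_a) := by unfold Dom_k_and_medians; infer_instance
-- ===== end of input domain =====

-- B replaces A's per-position side-count scans by an order-statistics test: it takes the h-th
-- smallest and h-th largest non-b positions and asks whether some b lies strictly between them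
-- (alternative decomposition; same asymptotic cost).


-- ===== PORT A =====
-- for i in range(1, n+1): l_a[i] = l_a[i-1] (+1 if i not in b_s); all indices are in range
def kamLoop1 (b_s : PySem.Set Int) (l_a : List Int) (i : Int) : Nat → List Int
  | 0 => l_a
  | fuel+1 =>
    let prev := (PySem.List.pyGet? l_a (i - 1)).getD 0
    let l_a1 := PySem.List.pySetD l_a i prev
    let l_a2 := if PySem.Set.contains b_s i then l_a1
                else PySem.List.pySetD l_a1 i (prev + 1)
    kamLoop1 b_s l_a2 (i + 1) fuel

-- for i in range(n, 0, -1): count r, return True at a b-position with both sides large enough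
def kamLoop2 (b_s : PySem.Set Int) (l_a : List Int) (h r i : Int) : Nat → Bool
  | 0 => false
  | fuel+1 =>
    if ¬ PySem.Set.contains b_s i then
      kamLoop2 b_s l_a h (r + 1) (i - 1) fuel
    else if r ≥ h ∧ (PySem.List.pyGet? l_a i).getD 0 ≥ h then true
    else kamLoop2 b_s l_a h r (i - 1) fuel

def k_and_medians (n : Int) (k : Int) (m : Int) (b_a : List Int) : Bool :=
  if PySem.Int.mod (n - m) (k - 1) ≠ 0 then false
  else
    let b_s := PySem.Set.ofList b_a
    let l_a := List.replicate (n + 1).toNat (0 : Int)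
    let l_a := kamLoop1 b_s l_a 1 n.toNat
    kamLoop2 b_s l_a (PySem.Int.floordiv (k - 1) 2) 0 n n.toNat

-- ===== PORT B =====
-- missing = [i for i in range(1, n+1) if i not in b_s]
def kamMiss (b_s : PySem.Set Int) (n : Int) : List Int :=
  (PySem.List.pyRange 1 (n + 1) 1).filter (fun i => ! PySem.Set.contains b_s i)

def k_and_medians_alt (n : Int) (k : Int) (m : Int) (b_a : List Int) : Bool :=
  if PySem.Int.mod (n - m) (k - 1) ≠ 0 then false
  else
    let b_s := PySem.Set.ofList b_a
    let h := PySem.Int.floordiv (k - 1) 2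
    if h ≤ 0 then
      -- every kept position qualifies: just need some b inside [1, n]
      b_s.any (fun b => decide (1 ≤ b ∧ b ≤ n))
    else
      let missing := kamMiss b_s n
      if (missing.length : Int) < 2 * h then false
      else
        let lo := (PySem.List.pyGet? missing (h - 1)).getD 0
        let hi := (PySem.List.pyGet? missing ((missing.length : Int) - h)).getD 0
        b_s.any (fun b => decide (lo < b ∧ b < hi))

-- ===== PRECONDITION & SPEC =====
-- Pre_ excludes exactly k = 1, where both programs raise ZeroDivisionError in (n-m) % (k-1).
def Pre_k_and_medians (n : Int) (k : Int) (m : Int) (b_a : List Int) : Prop := k ≠ 1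
instance (n : Int) (k : Int) (m : Int) (b_a : List Int) : Decidable (Pre_k_and_medians n k m b_a) := by unfold Pre_k_and_medians; infer_instance
def pvWitness_k_and_medians : Int × Int × Int × List Int := (3, 3, 1, [2])

def Spec_k_and_medians (n : Int) (k : Int) (m : Int) (b_a : List Int) (out : Bool) : Prop := out = k_and_medians_alt n k m b_a
instance (n : Int) (k : Int) (m : Int) (b_a : List Int) (out : Bool) : Decidable (Spec_k_and_medians n k m b_a out) := by unfold Spec_k_and_medians; infer_instance

-- ===== CLAIM (what is proved, stated in full; the proofs are below) =====
def Claim_equal_k_and_medians : Prop := ∀ (n : Int) (k : Int) (m : Int) (b_a : List Int), Dom_k_and_medians n k m b_a → Pre_k_and_medians n k m b_a → Spec_k_and_medians n k m b_a (k_and_medians n k m b_a)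

-- ===== LEMMAS AND PROOFS =====

-- number of positions in 1..j not in b_s
def kamCnt (b_s : PySem.Set Int) : Nat → Int
  | 0 => 0
  | j+1 => kamCnt b_s j + (if PySem.Set.contains b_s ((j : Int) + 1) then 0 else 1)

def kamQ (b_s : PySem.Set Int) (h : Int) (N j : Nat) : Bool :=
  PySem.Set.contains b_s (j : Int) &&
    decide (kamCnt b_s N - kamCnt b_s j ≥ h ∧ kamCnt b_s j ≥ h)

theorem kamLoop1_spec (b_s : PySem.Set Int) :
    ∀ (f t : Nat) (l_a : List Int), t + f < l_a.length →
      (∀ j : Nat, j ≤ t → l_a[j]? = some (kamCnt b_s j)) →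
      ∀ j : Nat, j ≤ t + f → (kamLoop1 b_s l_a ((t : Int) + 1) f)[j]? = some (kamCnt b_s j) := by
  intro f
  induction f with
  | zero =>
    intro t l_a _ hinv j hj
    rw [kamLoop1]
    exact hinv j (by omega)
  | succ f ih =>
    intro t l_a hlen hinv j hj
    have hsub : ((t : Int) + 1 - 1) = ((t : Nat) : Int) := by ring
    have hcast : ((t : Int) + 1) = ((t + 1 : Nat) : Int) := by push_cast; ring
    have hprev : (PySem.List.pyGet? l_a ((t : Int) + 1 - 1)).getD 0 = kamCnt b_s t := by
      rw [hsub, PySem.List.pyGet?_natCast, hinv t le_rfl]; rfl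
    have h3 : kamCnt b_s (t + 1)
        = kamCnt b_s t + (if PySem.Set.contains b_s ((t : Int) + 1) then 0 else 1) := rfl
    have key : kamLoop1 b_s l_a ((t : Int) + 1) (f + 1)
        = kamLoop1 b_s (l_a.set (t + 1) (kamCnt b_s (t + 1))) (((t + 1 : Nat) : Int) + 1) f := by
      rw [kamLoop1, hprev]
      by_cases hb : PySem.Set.contains b_s ((t : Int) + 1) = true
      · have hcnt : kamCnt b_s (t + 1) = kamCnt b_s t := by
          rw [h3, if_pos hb]; ring
        rw [if_pos hb, hcnt, hcast, PySem.List.pySetD_natCast]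
      · have hcnt : kamCnt b_s (t + 1) = kamCnt b_s t + 1 := by
          rw [h3, if_neg hb]
        rw [if_neg hb, hcnt, hcast, PySem.List.pySetD_natCast,
          PySem.List.pySetD_natCast, List.set_set]
    rw [key]
    have hlen' : (t + 1) + f < (l_a.set (t + 1) (kamCnt b_s (t + 1))).length := by
      simpa using (by omega : (t + 1) + f < l_a.length)
    refine ih (t + 1) _ hlen' ?_ j (by omega)
    intro j' hj'
    rw [List.getElem?_set]
    by_cases hje : t + 1 = j'
    · rw [if_pos hje, if_pos (by omega), hje]
    · rw [if_neg hje]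
      exact hinv j' (by omega)

theorem kamLoop2_spec (b_s : PySem.Set Int) (l_a : List Int) (h : Int) (N : Nat)
    (hget : ∀ j : Nat, j ≤ N → (PySem.List.pyGet? l_a (j : Int)).getD 0 = kamCnt b_s j) :
    ∀ (f i : Nat), f ≤ i → i ≤ N →
      kamLoop2 b_s l_a h (kamCnt b_s N - kamCnt b_s i) (i : Int) f
        = (List.range' (i + 1 - f) f).any (kamQ b_s h N) := by
  intro f
  induction f with
  | zero => intro i _ _; simp [kamLoop2]
  | succ f ih =>
    intro i hfi hiN
    obtain ⟨i', rfl⟩ : ∃ i', i = i' + 1 := ⟨i - 1, by omega⟩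
    have hcast : ((i' + 1 : Nat) : Int) = (i' : Int) + 1 := by push_cast; ring
    have hsub : ((i' : Int) + 1 - 1) = ((i' : Nat) : Int) := by ring
    have h3 : kamCnt b_s (i' + 1)
        = kamCnt b_s i' + (if PySem.Set.contains b_s ((i' : Int) + 1) then 0 else 1) := rfl
    have hrange : List.range' (i' + 1 + 1 - (f + 1)) (f + 1)
        = List.range' (i' + 1 - f) f ++ [i' + 1] := by
      have he : i' + 1 + 1 - (f + 1) = i' + 1 - f := by omega
      rw [he, List.range'_1_concat]
      congr 1
      simp
      omega
    have hQ : kamQ b_s h N (i' + 1)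
        = (PySem.Set.contains b_s ((i' : Int) + 1) &&
            decide (kamCnt b_s N - kamCnt b_s (i' + 1) ≥ h ∧ kamCnt b_s (i' + 1) ≥ h)) := by
      rw [kamQ, hcast]
    rw [kamLoop2, hrange, List.any_append, List.any_cons, List.any_nil, hcast, hQ]
    by_cases hb : PySem.Set.contains b_s ((i' : Int) + 1) = true
    · have hlook : (PySem.List.pyGet? l_a ((i' : Int) + 1)).getD 0 = kamCnt b_s (i' + 1) := by
        rw [← hcast]
        exact hget (i' + 1) (by omega)
      have hcnt : kamCnt b_s (i' + 1) = kamCnt b_s i' := by rw [h3, if_pos hb]; ring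
      rw [if_neg (not_not_intro hb), hlook]
      by_cases hchk : kamCnt b_s N - kamCnt b_s (i' + 1) ≥ h ∧ kamCnt b_s (i' + 1) ≥ h
      · rw [if_pos hchk]
        simp only [hb, Bool.true_and, decide_eq_true_eq]
        simp [hchk]
      · rw [if_neg hchk, hsub, hcnt, ih i' (by omega) (by omega)]
        rw [hcnt] at hchk
        simp only [decide_eq_false hchk, Bool.and_false, Bool.or_false, Bool.false_or]
    · have hbf : PySem.Set.contains b_s ((i' : Int) + 1) = false := by
        simp only [Bool.not_eq_true] at hb; exact hb
      have hcnt : kamCnt b_s (i' + 1) = kamCnt b_s i' + 1 := by rw [h3, if_neg hb]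
      rw [if_pos hb]
      have hr : kamCnt b_s N - kamCnt b_s (i' + 1) + 1 = kamCnt b_s N - kamCnt b_s i' := by
        rw [hcnt]; ring
      rw [hr, hsub, ih i' (by omega) (by omega)]
      simp only [hbf, Bool.false_and, Bool.or_false, Bool.false_or]

-- kamCnt j is the length of the missing-list restricted to 1..j
theorem kamCnt_eq_filter (b_s : PySem.Set Int) :
    ∀ j : Nat, kamCnt b_s j
      = (((PySem.List.pyRange 1 ((j : Int) + 1) 1).filter (fun i => ! PySem.Set.contains b_s i)).length : Int) := by
  intro j
  induction j with
  | zero => simp [kamCnt, PySem.List.pyRange_one_eq_nil]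
  | succ j ih =>
    have hs : PySem.List.pyRange 1 (((j + 1 : Nat) : Int) + 1) 1
        = PySem.List.pyRange 1 ((j : Int) + 1) 1 ++ [(j : Int) + 1] := by
      have : ((j + 1 : Nat) : Int) + 1 = ((j : Int) + 1) + 1 := by push_cast; ring
      rw [this, PySem.List.pyRange_one_succ_right (by omega)]
    have h3 : kamCnt b_s (j + 1)
        = kamCnt b_s j + (if PySem.Set.contains b_s ((j : Int) + 1) then 0 else 1) := rfl
    rw [h3, hs, List.filter_append, List.length_append, ih]
    by_cases hb : ((j : Int) + 1) ∈ b_s <;> simp [hb]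

theorem kamCnt_nonneg (b_s : PySem.Set Int) (j : Nat) : 0 ≤ kamCnt b_s j := by
  rw [kamCnt_eq_filter]
  exact Int.natCast_nonneg _

theorem kamCnt_mono (b_s : PySem.Set Int) : ∀ (j d : Nat), kamCnt b_s j ≤ kamCnt b_s (j + d) := by
  intro j d
  induction d with
  | zero => exact le_refl _
  | succ d ih =>
    have h3 : kamCnt b_s (j + d + 1)
        = kamCnt b_s (j + d) + (if PySem.Set.contains b_s (((j + d : Nat) : Int) + 1) then 0 else 1) := rfl
    have : j + (d + 1) = (j + d) + 1 := by omega
    rw [this, h3]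
    split_ifs <;> omega

theorem kamMiss_mem (b_s : PySem.Set Int) (n : Int) (x : Int) (hx : x ∈ kamMiss b_s n) :
    1 ≤ x ∧ x ≤ n ∧ PySem.Set.contains b_s x = false := by
  rw [kamMiss, List.mem_filter] at hx
  obtain ⟨hr, hp⟩ := hx
  rw [PySem.List.mem_pyRange_one] at hr
  refine ⟨hr.1, by omega, ?_⟩
  simpa using hp

theorem kamMiss_sorted (b_s : PySem.Set Int) (n : Int) : (kamMiss b_s n).Pairwise (· < ·) := by
  exact (PySem.List.pairwise_lt_pyRange_one 1 (n + 1)).filter _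

-- kamCnt j counts the elements of the missing list that are ≤ j
theorem kamCnt_countP (b_s : PySem.Set Int) (n : Int) (j : Nat) (hj : (j : Int) ≤ n) :
    kamCnt b_s j = ((kamMiss b_s n).countP (fun x => decide (x ≤ (j : Int))) : Int) := by
  have hsplit : PySem.List.pyRange 1 (n + 1) 1
      = PySem.List.pyRange 1 ((j : Int) + 1) 1 ++ PySem.List.pyRange ((j : Int) + 1) (n + 1) 1 := by
    exact PySem.List.pyRange_one_append 1 ((j : Int) + 1) (n + 1) (by omega) (by omega)
  rw [kamMiss, hsplit, List.filter_append, List.countP_append]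
  have h1 : ((PySem.List.pyRange 1 ((j : Int) + 1) 1).filter (fun i => ! PySem.Set.contains b_s i)).countP
      (fun x => decide (x ≤ (j : Int)))
      = ((PySem.List.pyRange 1 ((j : Int) + 1) 1).filter (fun i => ! PySem.Set.contains b_s i)).length := by
    rw [List.countP_eq_length]
    intro a ha
    have := (PySem.List.mem_pyRange_one.mp (List.mem_of_mem_filter ha)).2
    simp only [decide_eq_true_eq]
    omega
  have h2 : ((PySem.List.pyRange ((j : Int) + 1) (n + 1) 1).filter (fun i => ! PySem.Set.contains b_s i)).countP
      (fun x => decide (x ≤ (j : Int))) = 0 := by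
    rw [List.countP_eq_zero]
    intro a ha
    have := (PySem.List.mem_pyRange_one.mp (List.mem_of_mem_filter ha)).1
    simp only [decide_eq_true_eq]
    omega
  rw [h1, h2, kamCnt_eq_filter]
  push_cast
  ring

theorem kamMiss_len (b_s : PySem.Set Int) (n : Int) (hn : 0 ≤ n) :
    ((kamMiss b_s n).length : Int) = kamCnt b_s n.toNat := by
  rw [kamCnt_countP b_s n n.toNat (by omega)]
  congr 1
  refine (List.countP_eq_length.mpr ?_).symm
  intro a ha
  have := (kamMiss_mem b_s n a ha).2.1
  simp only [decide_eq_true_eq]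
  omega

-- order statistic of a strictly increasing list vs count of smaller elements
theorem kamIdx : ∀ (l : List Int), l.Pairwise (· < ·) →
    ∀ (H : Nat) (hH : H < l.length) (i : Int),
      (l[H] < i ↔ H + 1 ≤ l.countP (fun x => decide (x < i))) := by
  intro l
  induction l with
  | nil => intro _ H hH i; simp at hH
  | cons x tl ih =>
    intro hp H hH i
    have hx : ∀ y ∈ tl, x < y := (List.pairwise_cons.mp hp).1
    have htl : tl.Pairwise (· < ·) := (List.pairwise_cons.mp hp).2
    have hcnt : (x :: tl).countP (fun x => decide (x < i))
        = tl.countP (fun x => decide (x < i)) + (if x < i then 1 else 0) := by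
      rw [List.countP_cons]
      by_cases hxi : x < i <;> simp [hxi]
    cases H with
    | zero =>
      simp only [List.getElem_cons_zero, hcnt]
      constructor
      · intro h1; rw [if_pos h1]; omega
      · intro h1
        by_contra hxi
        have hz : tl.countP (fun x => decide (x < i)) = 0 := by
          rw [List.countP_eq_zero]
          intro a ha
          have := hx a ha
          simp only [decide_eq_true_eq]
          omega
        rw [hz, if_neg hxi] at h1
        omega
    | succ H =>
      simp only [List.getElem_cons_succ, hcnt]
      have hH' : H < tl.length := by simpa using hH
      by_cases hxi : x < i
      · rw [if_pos hxi]
        rw [ih htl H hH' i]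
        omega
      · rw [if_neg hxi]
        have hlt : x < tl[H] := hx _ (List.getElem_mem hH')
        have hz : tl.countP (fun x => decide (x < i)) = 0 := by
          rw [List.countP_eq_zero]
          intro a ha
          have := hx a ha
          simp only [decide_eq_true_eq]
          omega
        rw [hz]
        constructor
        · intro h1; omega
        · intro h1; omega

-- for a b-value b with 1 ≤ b ≤ n, kamCnt b.toNat counts the missing elements strictly below b
theorem kamCnt_lt (b_s : PySem.Set Int) (n b : Int) (hb1 : 1 ≤ b) (hbn : b ≤ n)
    (hmem : PySem.Set.contains b_s b = true) :
    kamCnt b_s b.toNat = ((kamMiss b_s n).countP (fun x => decide (x < b)) : Int) := by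
  rw [kamCnt_countP b_s n b.toNat (by omega)]
  have hpt : ∀ a ∈ kamMiss b_s n,
      (decide (a ≤ ((b.toNat : Nat) : Int)) = true ↔ decide (a < b) = true) := by
    intro a ha
    have hne : a ≠ b := by
      intro he
      have := (kamMiss_mem b_s n a ha).2.2
      rw [he, hmem] at this
      exact absurd this (by decide)
    have hcast : ((b.toNat : Nat) : Int) = b := by omega
    simp only [hcast, decide_eq_true_eq]
    constructor <;> intro <;> omega
  rw [List.countP_congr hpt]

-- ===== VERDICT (by name: the statement is the Claim_ definition above) =====
theorem k_and_medians_spec : Claim_equal_k_and_medians := by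
  intro n k m b_a _ _
  unfold Spec_k_and_medians k_and_medians k_and_medians_alt
  by_cases hg : PySem.Int.mod (n - m) (k - 1) ≠ 0
  · rw [if_pos hg, if_pos hg]
  · rw [if_neg hg, if_neg hg]
    set b_s := PySem.Set.ofList b_a with hbs
    set h0 := PySem.Int.floordiv (k - 1) 2 with hh0
    set N := n.toNat with hNdef
    -- A's result is an `any` over positions 1..N of the predicate kamQ
    have hA : kamLoop2 b_s (kamLoop1 b_s (List.replicate (n + 1).toNat (0 : Int)) 1 N) h0 0 n N
        = (List.range' 1 N).any (kamQ b_s h0 N) := by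
      rcases Nat.eq_zero_or_pos N with hN | hN
      · rw [hN]
        rw [kamLoop2]
        simp
      · have hn : n = (N : Int) := by omega
        have hrep : (n + 1).toNat = N + 1 := by omega
        have hla : ∀ j : Nat, j ≤ N →
            (kamLoop1 b_s (List.replicate (n + 1).toNat (0 : Int)) 1 N)[j]? = some (kamCnt b_s j) := by
          have h1 : (1 : Int) = ((0 : Nat) : Int) + 1 := by simp
          rw [hrep, h1]
          intro j hj
          refine kamLoop1_spec b_s N 0 _ (by simp) ?_ j (by omega)
          intro j' hj'
          have : j' = 0 := by omega
          subst this
          simp [kamCnt]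
        have hget : ∀ j : Nat, j ≤ N →
            (PySem.List.pyGet? (kamLoop1 b_s (List.replicate (n + 1).toNat (0 : Int)) 1 N) (j : Int)).getD 0
              = kamCnt b_s j := by
          intro j hj
          rw [PySem.List.pyGet?_natCast, hla j hj]
          rfl
        have hr : N + 1 - N = 1 := by omega
        have hA0 := kamLoop2_spec b_s
          (kamLoop1 b_s (List.replicate (n + 1).toNat (0 : Int)) 1 N) h0 N hget N N le_rfl le_rfl
        rw [sub_self, hr] at hA0
        rw [hn] at hA0 ⊢
        exact hA0
    rw [hA]
    by_cases hh : h0 ≤ 0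
    · -- both sides: "some b lies in [1, n]"
      rw [if_pos hh, Bool.eq_iff_iff]
      simp only [List.any_eq_true, decide_eq_true_eq]
      constructor
      · rintro ⟨j, hj, hq⟩
        rw [List.mem_range'_1] at hj
        rw [kamQ, Bool.and_eq_true] at hq
        refine ⟨(j : Int), (PySem.Set.contains_iff _ _).mp hq.1, by omega, by omega⟩
      · rintro ⟨b, hb, hb1, hbn⟩
        refine ⟨b.toNat, ?_, ?_⟩
        · rw [List.mem_range'_1]; omega
        · rw [kamQ]
          have hc : ((b.toNat : Nat) : Int) = b := by omega
          rw [hc, (PySem.Set.contains_iff _ _).mpr hb, Bool.true_and, decide_eq_true_eq]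
          have h1 := kamCnt_nonneg b_s b.toNat
          have h2 := kamCnt_mono b_s b.toNat (N - b.toNat)
          have he : b.toNat + (N - b.toNat) = N := by omega
          rw [he] at h2
          constructor <;> omega
    · rw [if_neg hh]
      push_neg at hh
      by_cases hlen : ((kamMiss b_s n).length : Int) < 2 * h0
      · -- too few missing positions: both sides are false
        rw [if_pos hlen, List.any_eq_false]
        intro j hj
        rw [List.mem_range'_1] at hj
        have hn0 : 0 ≤ n := by omega
        have hNn : kamCnt b_s N = ((kamMiss b_s n).length : Int) := (kamMiss_len b_s n hn0).symm
        rw [kamQ]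
        intro hq
        rw [Bool.and_eq_true, decide_eq_true_eq] at hq
        omega
      · rw [if_neg hlen]
        push_neg at hlen
        -- both sides: "some b lies strictly between the h-th smallest and h-th largest missing"
        set miss := kamMiss b_s n with hmiss
        set H := h0.toNat with hHdef
        have hH1 : 1 ≤ H := by omega
        have hHc : ((H : Nat) : Int) = h0 := by omega
        have htH : 2 * H ≤ miss.length := by omega
        have hn0 : 0 ≤ n := by
          by_contra hc
          have : miss.length = 0 := by
            rw [hmiss, kamMiss, PySem.List.pyRange_one_eq_nil (by omega)]
            simp
          omega
        have hNn : kamCnt b_s N = (miss.length : Int) := (kamMiss_len b_s n hn0).symm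
        have hnN : n = (N : Int) := by omega
        have hidx1 : H - 1 < miss.length := by omega
        have hidx2 : miss.length - H < miss.length := by omega
        have hlo : (PySem.List.pyGet? miss (h0 - 1)).getD 0 = miss[H - 1] := by
          have : h0 - 1 = ((H - 1 : Nat) : Int) := by omega
          rw [this, PySem.List.pyGet?_natCast, List.getElem?_eq_getElem hidx1]
          rfl
        have hhi : (PySem.List.pyGet? miss ((miss.length : Int) - h0)).getD 0 = miss[miss.length - H] := by
          have : (miss.length : Int) - h0 = ((miss.length - H : Nat) : Int) := by omega
          rw [this, PySem.List.pyGet?_natCast, List.getElem?_eq_getElem hidx2]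
          rfl
        rw [hlo, hhi, Bool.eq_iff_iff]
        simp only [List.any_eq_true, decide_eq_true_eq]
        have hsorted := kamMiss_sorted b_s n
        constructor
        · rintro ⟨j, hj, hq⟩
          rw [List.mem_range'_1] at hj
          rw [kamQ, Bool.and_eq_true, decide_eq_true_eq] at hq
          obtain ⟨hcont, hq2, hq1⟩ := hq
          set b : Int := (j : Int) with hbdef
          have hb1 : 1 ≤ b := by omega
          have hbn : b ≤ n := by omega
          have hjb : b.toNat = j := by omega
          have hcountl : kamCnt b_s j = (miss.countP (fun x => decide (x < b)) : Int) := by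
            rw [← hjb]
            exact kamCnt_lt b_s n b hb1 hbn hcont
          refine ⟨b, (PySem.Set.contains_iff _ _).mp hcont, ?_, ?_⟩
          · rw [kamIdx miss hsorted (H - 1) hidx1 b]
            have : H - 1 + 1 = H := by omega
            rw [this]
            omega
          · by_contra hge
            push_neg at hge
            have hne : miss[miss.length - H] ≠ b := by
              intro he
              have := (kamMiss_mem b_s n _ (List.getElem_mem hidx2)).2.2
              rw [he, hcont] at this
              exact absurd this (by decide)
            have hlt : miss[miss.length - H] < b := by
              rcases lt_or_eq_of_le hge with h | h
              · exact h
              · exact absurd h hne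
            rw [kamIdx miss hsorted (miss.length - H) hidx2 b] at hlt
            omega
        · rintro ⟨b, hb, hlob, hbhi⟩
          have hmemlo := kamMiss_mem b_s n _ (List.getElem_mem hidx1)
          have hmemhi := kamMiss_mem b_s n _ (List.getElem_mem hidx2)
          have hb1 : 1 ≤ b := by omega
          have hbn : b ≤ n := by omega
          have hcont : PySem.Set.contains b_s b = true := (PySem.Set.contains_iff _ _).mpr hb
          have hjb : ((b.toNat : Nat) : Int) = b := by omega
          refine ⟨b.toNat, ?_, ?_⟩
          · rw [List.mem_range'_1]; omega
          · rw [kamQ, hjb, hcont, Bool.true_and, decide_eq_true_eq]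
            have hcountl : kamCnt b_s b.toNat = (miss.countP (fun x => decide (x < b)) : Int) :=
              kamCnt_lt b_s n b hb1 hbn hcont
            have hle : (H : Nat) ≤ miss.countP (fun x => decide (x < b)) := by
              have := (kamIdx miss hsorted (H - 1) hidx1 b).mp hlob
              omega
            have hub : miss.countP (fun x => decide (x < b)) + H ≤ miss.length := by
              by_contra hc
              push_neg at hc
              have : miss.length - H + 1 ≤ miss.countP (fun x => decide (x < b)) := by omega
              have := (kamIdx miss hsorted (miss.length - H) hidx2 b).mpr this
              omega
            constructor <;> omega
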